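-- pv_equiv track=rewrite | github.com/yc-tao/Search-R1 | ablation_diagnosis.py | extract_last_section
-- ===== SOURCE A (Python) =====
-- def extract_last_section(concatenated_note):
--     """
--     Extract the last section of the note split by '=' separator lines.
--
--     Args:
--         concatenated_note: The full concatenated note text
--
--     Returns:
--         The last section of the note, or empty string if no separator found
--     """
--     separator = "=" * 80
--     sections = concatenated_note.split(separator)
--
--     # Filter out empty sections
--     sections = [s.strip() for s in sections if s.strip()]
--
--     if sections:
--         return sections[-1]
--     else:
--         return ""
-- ===== SOURCE B (Python) =====
-- def extract_last_section(concatenated_note):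
--     # Streaming scan: locate separator occurrences one by one with str.find,
--     # keeping only the last non-blank segment seen so far -- no split(), no list.
--     separator = "=" * 80
--     result = ""
--     rest = concatenated_note
--     while True:
--         i = rest.find(separator)
--         if i < 0:
--             t = rest.strip()
--             return t if t else result
--         t = rest[:i].strip()
--         if t:
--             result = t
--         rest = rest[i + len(separator):]
-- ===== Notes on version B (the rewrite author's own statement) =====
-- stated objective: alternative
-- what changed: B never calls split() or builds a list of sections: it streams through the string with repeated str.find on the separator, stripping each segment as it is delimited and keeping only the last non-blank one in a single accumulator variable.
import Mathlib
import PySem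

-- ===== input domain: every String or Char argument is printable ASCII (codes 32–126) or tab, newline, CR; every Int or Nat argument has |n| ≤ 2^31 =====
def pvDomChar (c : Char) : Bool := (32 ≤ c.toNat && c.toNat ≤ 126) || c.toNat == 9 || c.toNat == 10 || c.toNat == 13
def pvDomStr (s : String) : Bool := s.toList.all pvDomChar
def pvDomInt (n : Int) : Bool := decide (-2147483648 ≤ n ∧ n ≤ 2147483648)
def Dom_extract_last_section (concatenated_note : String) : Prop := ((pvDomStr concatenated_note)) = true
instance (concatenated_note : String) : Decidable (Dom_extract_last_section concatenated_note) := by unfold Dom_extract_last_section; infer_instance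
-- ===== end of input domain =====

-- B streams through the string with repeated find on the separator, stripping each
-- delimited segment and keeping the last non-blank one in an accumulator: no split(),
-- no intermediate list (objective: alternative, same cost).


-- ===== PORT A =====
-- Port of A: split on 80 '='s, build the list of stripped non-empty sections, last or "".
def extract_last_section (concatenated_note : String) : String :=
  let separator : String := String.ofList (List.replicate 80 '=')
  let sections : List String := (PySem.Str.split? concatenated_note separator).getD []  -- sep ≠ "", so split? is `some`
  let sections : List String :=
    (sections.map PySem.Str.strip).filter (fun t => t ≠ "")
  if sections.isEmpty then "" else (PySem.List.pyGet? sections (-1)).getD ""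

-- ===== PORT B =====
-- the constant separator '='*80 (as a char list; Source B's string ops are ported on .toList)
def pvSep : List Char := List.replicate 80 '='

-- Source B's while-loop: find the next separator; if none, return the stripped remainder
-- (or the accumulator if blank); otherwise strip the segment before it, update the
-- accumulator if non-blank, and continue after the separator.
def pvScan (rest : List Char) (result : List Char) : List Char :=
  let i := PySem.Chars.find rest pvSep
  if i < 0 then
    let t := PySem.Chars.strip rest
    if t ≠ [] then t else result
  else
    let t := PySem.Chars.strip (rest.take i.toNat)
    pvScan (rest.drop (i.toNat + pvSep.length)) (if t ≠ [] then t else result)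
termination_by rest.length
decreasing_by
  rename_i h
  have hinf : pvSep <:+: rest := by
    have h0 : 0 ≤ PySem.Chars.find rest pvSep := by omega
    exact (PySem.Chars.find_nonneg_iff rest pvSep).mp h0
  have hlen : pvSep.length ≤ rest.length := hinf.length_le
  have : pvSep.length = 80 := by simp [pvSep]
  simp only [List.length_drop]
  omega

def extract_last_section_alt (concatenated_note : String) : String :=
  String.ofList (pvScan concatenated_note.toList [])

-- ===== PRECONDITION & SPEC =====
def Spec_extract_last_section (concatenated_note : String) (out : String) : Prop := out = extract_last_section_alt concatenated_note
instance (concatenated_note : String) (out : String) : Decidable (Spec_extract_last_section concatenated_note out) := by unfold Spec_extract_last_section; infer_instance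

-- ===== CLAIM (what is proved, stated in full; the proofs are below) =====
def Claim_equal_extract_last_section : Prop := ∀ (concatenated_note : String), Dom_extract_last_section concatenated_note → Spec_extract_last_section concatenated_note (extract_last_section concatenated_note)

-- ===== LEMMAS AND PROOFS =====

-- proof-side mirror of Python's non-overlapping left-to-right split, phrased via `find`
def pvSplitF (s : List Char) : List (List Char) :=
  let i := PySem.Chars.find s pvSep
  if i < 0 then [s]
  else s.take i.toNat :: pvSplitF (s.drop (i.toNat + pvSep.length))
termination_by s.length
decreasing_by
  rename_i h
  have hinf : pvSep <:+: s := by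
    have h0 : 0 ≤ PySem.Chars.find s pvSep := by omega
    exact (PySem.Chars.find_nonneg_iff s pvSep).mp h0
  have hlen : pvSep.length ≤ s.length := hinf.length_le
  have : pvSep.length = 80 := by simp [pvSep]
  simp only [List.length_drop]
  omega

theorem pvSep_ne_nil : pvSep ≠ [] := by simp [pvSep]

-- `find` is the unique first occurrence
theorem pvFind_eq_of (s sub : List Char) (k : ℕ) (hk : sub <+: s.drop k)
    (hmin : ∀ i < k, ¬ sub <+: s.drop i) : PySem.Chars.find s sub = (k : ℤ) := by
  have hinf : sub <:+: s := hk.isInfix.trans (List.drop_suffix k s).isInfix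
  have h0 : 0 ≤ PySem.Chars.find s sub := (PySem.Chars.find_nonneg_iff s sub).mpr hinf
  obtain ⟨hpre, hlt⟩ := PySem.Chars.find_spec h0
  rcases lt_trichotomy (PySem.Chars.find s sub).toNat k with h | h | h
  · exact absurd hpre (hmin _ h)
  · omega
  · exact absurd hk (hlt k h)

theorem pvFind_of_prefix (s sub : List Char) (h : sub <+: s) :
    PySem.Chars.find s sub = 0 := pvFind_eq_of s sub 0 (by simpa using h) (by omega)

theorem pvFind_cons (c : Char) (rest sub : List Char) (h : ¬ sub <+: (c :: rest)) :
    PySem.Chars.find (c :: rest) sub =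
      (if PySem.Chars.find rest sub = -1 then -1 else PySem.Chars.find rest sub + 1) := by
  by_cases hr : PySem.Chars.find rest sub = -1
  · rw [if_pos hr]
    rw [PySem.Chars.find_eq_neg_one_iff] at hr ⊢
    intro hin
    rcases List.infix_cons_iff.mp hin with hp | hi
    · exact h hp
    · exact hr hi
  · rw [if_neg hr]
    have h0 : 0 ≤ PySem.Chars.find rest sub := by
      have := PySem.Chars.neg_one_le_find rest sub
      omega
    obtain ⟨hpre, hlt⟩ := PySem.Chars.find_spec h0
    set k := (PySem.Chars.find rest sub).toNat with hkdef
    have : PySem.Chars.find (c :: rest) sub = ((k + 1 : ℕ) : ℤ) := by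
      apply pvFind_eq_of
      · simpa using hpre
      · intro i hi
        cases i with
        | zero => simpa using h
        | succ j => simpa using hlt j (by omega)
    rw [this]
    push_cast
    omega

theorem pvSplitF_ne_nil (l : List Char) : pvSplitF l ≠ [] := by
  rw [pvSplitF]
  split <;> simp

-- splitOn.go computed via pvSplitF
theorem pvGo_eq (fuel : ℕ) (l cur : List Char) (acc : List (List Char))
    (hfuel : l.length + 1 ≤ fuel) :
    PySem.Chars.splitOn.go pvSep fuel l cur acc =
      acc.reverse ++
        (match pvSplitF l with
         | [] => []
         | h :: t => (cur.reverse ++ h) :: t) := by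
  induction fuel generalizing l cur acc with
  | zero => omega
  | succ fuel ih =>
    cases l with
    | nil =>
      have hgo : PySem.Chars.splitOn.go pvSep (fuel+1) [] cur acc =
          (cur.reverse :: acc).reverse := rfl
      have hs : pvSplitF [] = [[]] := by
        rw [pvSplitF]
        have : PySem.Chars.find [] pvSep = -1 := by
          rw [PySem.Chars.find_eq_neg_one_iff]
          intro hin
          have := hin.length_le
          simp [pvSep] at this
        simp [this]
      rw [hgo, hs]
      simp
    | cons c rest =>
      by_cases hp : pvSep.isPrefixOf (c :: rest) = true
      · have hgo : PySem.Chars.splitOn.go pvSep (fuel+1) (c :: rest) cur acc =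
            PySem.Chars.splitOn.go pvSep fuel (List.drop pvSep.length (c :: rest)) []
              (cur.reverse :: acc) := by
          show (if pvSep.isPrefixOf (c :: rest) = true then _ else _) = _
          rw [if_pos hp]
        have hpre : pvSep <+: (c :: rest) := List.isPrefixOf_iff_prefix.mp hp
        have hf : PySem.Chars.find (c :: rest) pvSep = 0 := pvFind_of_prefix _ _ hpre
        have hs : pvSplitF (c :: rest) =
            [] :: pvSplitF (List.drop pvSep.length (c :: rest)) := by
          rw [pvSplitF]
          simp [hf]
        have hfl : (List.drop pvSep.length (c :: rest)).length + 1 ≤ fuel := by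
          have := hpre.length_le
          simp only [List.length_drop] at *
          simp only [List.length_cons] at *
          have h80 : pvSep.length = 80 := by simp [pvSep]
          omega
        rw [hgo, ih _ _ _ hfl, hs]
        cases hnn : pvSplitF (List.drop pvSep.length (c :: rest)) with
        | nil => exact absurd hnn (pvSplitF_ne_nil _)
        | cons h t => simp
      · have hgo : PySem.Chars.splitOn.go pvSep (fuel+1) (c :: rest) cur acc =
            PySem.Chars.splitOn.go pvSep fuel rest (c :: cur) acc := by
          show (if pvSep.isPrefixOf (c :: rest) = true then _ else _) = _
          rw [if_neg hp]
        have hnp : ¬ pvSep <+: (c :: rest) := fun h => hp (List.isPrefixOf_iff_prefix.mpr h)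
        have hfl : rest.length + 1 ≤ fuel := by simp at hfuel; omega
        rw [hgo, ih _ _ _ hfl]
        have hfc := pvFind_cons c rest pvSep hnp
        by_cases hr : PySem.Chars.find rest pvSep = -1
        · have hsc : pvSplitF (c :: rest) = [c :: rest] := by
            rw [pvSplitF]; simp [hfc, hr]
          have hsr : pvSplitF rest = [rest] := by
            rw [pvSplitF]; simp [hr]
          rw [hsc, hsr]
          simp
        · have h0 : 0 ≤ PySem.Chars.find rest pvSep := by
            have := PySem.Chars.neg_one_le_find rest pvSep
            omega
          set f := PySem.Chars.find rest pvSep with hfdef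
          have hfc' : PySem.Chars.find (c :: rest) pvSep = f + 1 := by rw [hfc, if_neg hr]
          have htn : (f + 1).toNat = f.toNat + 1 := by omega
          have hsc : pvSplitF (c :: rest) =
              (c :: List.take f.toNat rest) :: pvSplitF (List.drop (f.toNat + pvSep.length) rest) := by
            rw [pvSplitF]
            simp only [hfc']
            rw [if_neg (by omega), htn]
            simp [List.drop_succ_cons, Nat.add_right_comm]
          have hsr : pvSplitF rest =
              List.take f.toNat rest :: pvSplitF (List.drop (f.toNat + pvSep.length) rest) := by
            rw [pvSplitF]
            rw [← hfdef, if_neg (by omega)]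
          rw [hsc, hsr]
          simp

theorem pvSplitOn_eq (l : List Char) : PySem.Chars.splitOn l pvSep = pvSplitF l := by
  have := pvGo_eq (l.length + 1) l [] [] (le_refl _)
  rw [PySem.Chars.splitOn, this]
  cases hnn : pvSplitF l with
  | nil => exact absurd hnn (pvSplitF_ne_nil _)
  | cons h t => simp

-- B's loop is a left fold of the update step over the split segments
theorem pvScan_eq (rest acc : List Char) :
    pvScan rest acc =
      (pvSplitF rest).foldl
        (fun a s => if PySem.Chars.strip s ≠ [] then PySem.Chars.strip s else a) acc := by
  by_cases hneg : PySem.Chars.find rest pvSep < 0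
  · rw [pvScan, pvSplitF, if_pos hneg, if_pos hneg]
    simp only [List.foldl_cons, List.foldl_nil]
  · rw [pvScan, pvSplitF, if_neg hneg, if_neg hneg]
    rw [pvScan_eq]
    simp only [List.foldl_cons]
termination_by rest.length
decreasing_by
  have hinf : pvSep <:+: rest := by
    have h0 : 0 ≤ PySem.Chars.find rest pvSep := by omega
    exact (PySem.Chars.find_nonneg_iff rest pvSep).mp h0
  have hlen : pvSep.length ≤ rest.length := hinf.length_le
  have : pvSep.length = 80 := by simp [pvSep]
  simp only [List.length_drop]
  omega

-- the fold computes the last non-blank stripped segment (default: the accumulator)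
theorem pvFoldl_getLastD (l : List (List Char)) (acc : List Char) :
    l.foldl (fun a s => if PySem.Chars.strip s ≠ [] then PySem.Chars.strip s else a) acc =
      ((l.map PySem.Chars.strip).filter (fun t => t ≠ [])).getLastD acc := by
  induction l generalizing acc with
  | nil => rfl
  | cons s t ih =>
    simp only [List.foldl_cons, List.map_cons, List.filter_cons]
    by_cases h : PySem.Chars.strip s = []
    · rw [if_neg (not_not_intro h), if_neg (by simp [h]), ih]
    · rw [if_pos h, if_pos (by simp [h]), ih, List.getLastD_cons]

-- negative index -1 reads the last element
theorem pvGetNegOne_eq_getLast? {α : Type} (fs : List α) :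
    PySem.List.pyGet? fs (-1) = fs.getLast? := by
  cases fs with
  | nil => rfl
  | cons a t =>
    simp only [PySem.List.pyGet?, PySem.List.pyIdx?]
    rw [if_neg (by simp : ¬ ((0:Int) ≤ -1)),
        if_pos (by simp : -((a :: t).length : Int) ≤ -1)]
    have h1 : (a :: t).length - ((- (-1 : Int)).toNat) = (a :: t).length - 1 := by
      norm_num
    simp only [Option.bind_some, h1]
    rw [List.getElem?_eq_getElem (by simp), List.getLast?_eq_some_getLast (by simp),
        List.getLast_eq_getElem]
    rfl

-- ===== VERDICT (by name: the statement is the Claim_ definition above) =====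
theorem extract_last_section_spec : Claim_equal_extract_last_section := by
  intro s _
  unfold Spec_extract_last_section extract_last_section extract_last_section_alt
  dsimp only
  rw [pvScan_eq, pvFoldl_getLastD]
  have hsep : (String.ofList (List.replicate 80 '=')).toList = pvSep := by
    rw [String.toList_ofList]; rfl
  have hsplit : PySem.Str.split? s (String.ofList (List.replicate 80 '=')) =
      some (List.map String.ofList (pvSplitF s.toList)) := by
    rw [PySem.Str.split?, hsep, PySem.Chars.split?,
        if_neg (by simp [pvSep_ne_nil]), pvSplitOn_eq]
    rfl
  rw [hsplit]
  simp only [Option.getD_some, List.map_map]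
  have hstrip : ∀ cs : List Char,
      PySem.Str.strip (String.ofList cs) = String.ofList (PySem.Chars.strip cs) := by
    intro cs
    apply String.toList_inj.mp
    simp
  have hmap : List.map (PySem.Str.strip ∘ String.ofList) (pvSplitF s.toList) =
      List.map (String.ofList ∘ PySem.Chars.strip) (pvSplitF s.toList) := by
    apply List.map_congr_left
    intro a _
    exact hstrip a
  rw [hmap, ← List.map_map, List.filter_map]
  have hpf : ((fun t => decide (t ≠ "")) ∘ String.ofList) =
      fun cs : List Char => decide (cs ≠ []) := by
    funext cs
    have hiff : (String.ofList cs = "") ↔ cs = [] := by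
      constructor
      · intro he
        simpa [String.toList_ofList] using congrArg String.toList he
      · intro he
        rw [he]
    simp only [Function.comp_apply, decide_eq_decide, ne_eq]
    exact not_congr hiff
  rw [hpf]
  set M := ((pvSplitF s.toList).map PySem.Chars.strip).filter (fun cs => decide (cs ≠ [])) with hM
  rw [List.getLastD_eq_getLast?]
  cases hMc : M with
  | nil => rfl
  | cons m t =>
    have hne : (List.map String.ofList (m :: t)).isEmpty = false := by simp
    rw [hne]
    simp only [Bool.false_eq_true, if_false]
    rw [pvGetNegOne_eq_getLast?, List.getLast?_map]
    cases hl : (m :: t).getLast? with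
    | none => simp at hl
    | some x => simp
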